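-- pv_equiv track=rewrite | github.com/Blackgaurd/advent-of-code | AOC2024/day22/part2.py | gen_deltas_mp
-- ===== SOURCE A (Python) =====
-- from collections import deque
--
-- def get_deltas(prices: deque[int]):
--     it = iter(prices)
--     pre = next(it)
--
--     ret = []
--     for p in it:
--         ret.append(p - pre)
--         pre = p
--
--     return tuple(ret)
--
-- def gen_deltas_mp(price_arr: list[int]):
--     ret = dict()
--
--     cur_prices = deque(maxlen=5)
--     for p in price_arr:
--         cur_prices.append(p)
--         if len(cur_prices) == 5:
--             deltas = get_deltas(cur_prices)
--             if deltas not in ret: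
--                 ret[deltas] = p
--
--     return ret
-- ===== SOURCE B (Python) =====
-- def gen_deltas_mp(price_arr: list[int]):
--     # Precompute the full delta table once, then slide over it by zipping
--     # four shifted views with the corresponding 5th prices: no deque, no
--     # per-step delta recomputation.
--     d = [b - a for a, b in zip(price_arr, price_arr[1:])]
--     ret = {}
--     for key, price in zip(zip(d, d[1:], d[2:], d[3:]), price_arr[4:]):
--         if key not in ret:
--             ret[key] = price
--     return ret
-- ===== Notes on version B (the rewrite author's own statement) =====
-- stated objective: alternative
-- what changed: Replaces the maxlen-5 deque with per-window delta recomputation by a single precomputed delta table whose four shifted views are zipped with the 5th prices, inserting first occurrences in one pass.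
import Mathlib
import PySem

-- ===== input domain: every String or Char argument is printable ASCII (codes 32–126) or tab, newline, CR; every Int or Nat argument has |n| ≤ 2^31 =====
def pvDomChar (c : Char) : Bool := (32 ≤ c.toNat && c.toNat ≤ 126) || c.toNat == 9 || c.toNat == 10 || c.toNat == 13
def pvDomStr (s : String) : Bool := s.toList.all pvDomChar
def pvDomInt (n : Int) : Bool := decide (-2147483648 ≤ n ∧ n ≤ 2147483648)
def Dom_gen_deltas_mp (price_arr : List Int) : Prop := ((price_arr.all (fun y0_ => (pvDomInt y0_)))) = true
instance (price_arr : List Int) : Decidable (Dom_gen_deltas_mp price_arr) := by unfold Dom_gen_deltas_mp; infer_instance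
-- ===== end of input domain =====

-- B changes the algorithm shape: one precomputed delta table zipped with the 5th prices,
-- instead of A's maxlen-5 deque with per-window delta recomputation (objective: alternative).

-- ===== PORT A =====
-- get_deltas(prices): next(it) then accumulate successive differences.
-- (never called on an empty deque by gen_deltas_mp; [] stands for that unreached branch)
def get_deltas (prices : List Int) : List Int :=
  match prices with
  | [] => []
  | pre :: it => (it.foldl (fun (st : Int × List Int) p => (p, st.2 ++ [p - st.1])) (pre, [])).2

-- the body of A's for-loop: append p to the maxlen-5 deque, and on a full window
-- record get_deltas(window) -> p if the key is new
def a_step (st : List Int × PySem.Dict (List Int) Int) (p : Int) :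
    List Int × PySem.Dict (List Int) Int :=
  let cur := st.1 ++ [p]
  let cur := if 5 < cur.length then cur.drop 1 else cur
  if cur.length = 5 then
    let deltas := get_deltas cur
    if (st.2.get? deltas).isNone then (cur, st.2.insert deltas p) else (cur, st.2)
  else (cur, st.2)

def gen_deltas_mp (price_arr : List Int) : List (List Int × Int) :=
  (price_arr.foldl a_step ([], PySem.Dict.empty)).2.items

-- ===== PORT B =====
-- d = [b - a for a, b in zip(price_arr, price_arr[1:])]
def alt_deltas (l : List Int) : List Int :=
  (l.zip (l.drop 1)).map (fun q => q.2 - q.1)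

-- zip(d, d[1:], d[2:], d[3:]) with the 4-tuples written as lists
def keysOf (d : List Int) : List (List Int) :=
  ((d.zip (d.drop 1)).zip ((d.drop 2).zip (d.drop 3))).map
    (fun x => [x.1.1, x.1.2, x.2.1, x.2.2])

def gen_deltas_mp_alt (price_arr : List Int) : List (List Int × Int) :=
  (((keysOf (alt_deltas price_arr)).zip (price_arr.drop 4)).foldl
    (fun (ret : PySem.Dict (List Int) Int) kv =>
      if (ret.get? kv.1).isNone then ret.insert kv.1 kv.2 else ret)
    PySem.Dict.empty).items

-- ===== PRECONDITION & SPEC =====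
def Spec_gen_deltas_mp (price_arr : List Int) (out : List (List Int × Int)) : Prop := out = gen_deltas_mp_alt price_arr
instance (price_arr : List Int) (out : List (List Int × Int)) : Decidable (Spec_gen_deltas_mp price_arr out) := by unfold Spec_gen_deltas_mp; infer_instance

-- ===== CLAIM (what is proved, stated in full; the proofs are below) =====
def Claim_equal_gen_deltas_mp : Prop := ∀ (price_arr : List Int), Dom_gen_deltas_mp price_arr → Spec_gen_deltas_mp price_arr (gen_deltas_mp price_arr)

-- ===== LEMMAS AND PROOFS =====

-- canonical list of (delta-window, 5th price) pairs, one per 5-window of l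
def pairs : List Int → List (List Int × Int)
  | a :: b :: c :: d :: e :: rest =>
      ([b - a, c - b, d - c, e - d], e) :: pairs (b :: c :: d :: e :: rest)
  | _ => []
termination_by l => l.length
decreasing_by simp

-- insert-if-absent, the common dict step
def insStep (ret : PySem.Dict (List Int) Int) (kv : List Int × Int) : PySem.Dict (List Int) Int :=
  if (ret.get? kv.1).isNone then ret.insert kv.1 kv.2 else ret

lemma pairs_cons5 (a b c d e : Int) (r : List Int) :
    pairs (a :: b :: c :: d :: e :: r)
      = ([b - a, c - b, d - c, e - d], e) :: pairs (b :: c :: d :: e :: r) := by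
  rw [pairs]

lemma pairs_small (l : List Int) (h : l.length < 5) : pairs l = [] := by
  rw [pairs.eq_def]
  split
  · simp at h; omega
  · rfl

lemma len5_destruct (w : List Int) (h : w.length = 5) :
    ∃ a b c d e, w = [a, b, c, d, e] := by
  match w, h with
  | [a, b, c, d, e], _ => exact ⟨a, b, c, d, e, rfl⟩

lemma a_full (l : List Int) :
    ∀ (w : List Int) (ret : PySem.Dict (List Int) Int), w.length = 5 →
    (l.foldl a_step (w, ret)).2 = (pairs (w.drop 1 ++ l)).foldl insStep ret := by
  induction l with
  | nil =>
      intro w ret hw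
      obtain ⟨a, b, c, d, e, rfl⟩ := len5_destruct w hw
      have h4 : ([a, b, c, d, e] : List Int).drop 1 ++ [] = [b, c, d, e] := by simp
      rw [h4, pairs_small _ (by simp)]
      rfl
  | cons p l ih =>
      intro w ret hw
      obtain ⟨a, b, c, d, e, rfl⟩ := len5_destruct w hw
      have hstep : a_step ([a, b, c, d, e], ret) p =
          ([b, c, d, e, p], insStep ret ([c - b, d - c, e - d, p - e], p)) := by
        simp [a_step, get_deltas, insStep] <;> split <;> rfl
      have hpairs : pairs (([a, b, c, d, e] : List Int).drop 1 ++ p :: l) =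
          ([c - b, d - c, e - d, p - e], p) :: pairs (c :: d :: e :: p :: l) := by
        simp [pairs_cons5]
      rw [List.foldl_cons, hstep, ih [b, c, d, e, p] _ (by simp), hpairs]
      simp

lemma alt_deltas_cons (a b : Int) (t : List Int) :
    alt_deltas (a :: b :: t) = (b - a) :: alt_deltas (b :: t) := by
  simp [alt_deltas]

lemma keysOf_cons (x y z u : Int) (r : List Int) :
    keysOf (x :: y :: z :: u :: r) = [x, y, z, u] :: keysOf (y :: z :: u :: r) := by
  simp [keysOf]

lemma b_eq_pairs (l : List Int) :
    (keysOf (alt_deltas l)).zip (l.drop 4) = pairs l := by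
  induction l with
  | nil => rw [pairs_small _ (by simp)]; simp
  | cons a l ih =>
      match l with
      | [] => rw [pairs_small _ (by simp)]; simp
      | [b] => rw [pairs_small _ (by simp)]; simp
      | [b, c] => rw [pairs_small _ (by simp)]; simp
      | [b, c, d] => rw [pairs_small _ (by simp)]; simp
      | b :: c :: d :: e :: r =>
          have hd : alt_deltas (a :: b :: c :: d :: e :: r)
              = (b - a) :: (c - b) :: (d - c) :: (e - d) :: alt_deltas (e :: r) := by
            simp [alt_deltas_cons]
          have hd' : alt_deltas (b :: c :: d :: e :: r)
              = (c - b) :: (d - c) :: (e - d) :: alt_deltas (e :: r) := by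
            simp [alt_deltas_cons]
          rw [hd' ] at ih
          rw [hd, keysOf_cons, pairs_cons5]
          have ih' : (keysOf ((c - b) :: (d - c) :: (e - d) :: alt_deltas (e :: r))).zip r
              = pairs (b :: c :: d :: e :: r) := by
            simpa using ih
          simp [List.zip_cons_cons, ih']

-- ===== VERDICT (by name: the statement is the Claim_ definition above) =====
theorem gen_deltas_mp_spec : Claim_equal_gen_deltas_mp := by
  intro l _
  show gen_deltas_mp l = gen_deltas_mp_alt l
  have hb : gen_deltas_mp_alt l = ((pairs l).foldl insStep PySem.Dict.empty).items := by
    unfold gen_deltas_mp_alt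
    rw [b_eq_pairs l]
    rfl
  match l with
  | [] => simp [gen_deltas_mp, gen_deltas_mp_alt, alt_deltas, keysOf, a_step]
  | [a] => simp [gen_deltas_mp, gen_deltas_mp_alt, alt_deltas, keysOf, a_step]
  | [a, b] => simp [gen_deltas_mp, gen_deltas_mp_alt, alt_deltas, keysOf, a_step]
  | [a, b, c] => simp [gen_deltas_mp, gen_deltas_mp_alt, alt_deltas, keysOf, a_step]
  | [a, b, c, d] => simp [gen_deltas_mp, gen_deltas_mp_alt, alt_deltas, keysOf, a_step]
  | a :: b :: c :: d :: e :: r =>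
      rw [hb]
      unfold gen_deltas_mp
      have h5 : [a, b, c, d, e].foldl a_step (([] : List Int), PySem.Dict.empty) =
          ([a, b, c, d, e], insStep PySem.Dict.empty ([b - a, c - b, d - c, e - d], e)) := by
        simp [a_step, get_deltas, insStep]
      have hsplit : (a :: b :: c :: d :: e :: r).foldl a_step (([] : List Int), PySem.Dict.empty)
          = r.foldl a_step ([a, b, c, d, e],
              insStep PySem.Dict.empty ([b - a, c - b, d - c, e - d], e)) := by
        rw [show (a :: b :: c :: d :: e :: r) = [a, b, c, d, e] ++ r from rfl,
          List.foldl_append, h5]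
      rw [hsplit, a_full r [a, b, c, d, e] _ (by simp), pairs_cons5]
      simp
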